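-- pv_equiv track=rewrite | github.com/smitjethwa/python_solutions | tcs-nqt/nqt2.py | calc
-- ===== SOURCE A (Python) =====
-- def calc(n):
-- 	ip = []
-- 	even = 0
-- 	odd = 0
-- 	for i in range(0,n):
-- 		if i%2 == 0:
-- 			ip.append(even)
-- 			even += 2
-- 		elif i%2 != 0:
-- 			ip.append(odd)
-- 			odd += 1
-- 	return(ip)
-- ===== SOURCE B (Python) =====
-- def calc(n):
--     return [i if i % 2 == 0 else (i - 1) // 2 for i in range(n)]
-- ===== Notes on version B (the rewrite author's own statement) =====
-- stated objective: simpler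
-- what changed: Replaces the loop with two running counters by a stateless comprehension computing each element in closed form (i for even i, (i-1)//2 for odd i).
import Mathlib
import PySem

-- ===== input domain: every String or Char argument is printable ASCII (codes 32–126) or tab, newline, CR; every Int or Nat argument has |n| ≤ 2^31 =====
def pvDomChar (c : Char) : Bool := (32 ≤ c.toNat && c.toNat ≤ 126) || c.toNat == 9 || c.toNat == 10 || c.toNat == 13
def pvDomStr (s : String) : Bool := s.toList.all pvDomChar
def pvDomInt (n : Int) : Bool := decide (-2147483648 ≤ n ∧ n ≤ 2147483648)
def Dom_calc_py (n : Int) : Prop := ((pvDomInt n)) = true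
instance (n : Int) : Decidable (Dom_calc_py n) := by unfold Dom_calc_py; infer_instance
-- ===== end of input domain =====

-- B replaces A's loop with two running counters by a stateless per-index closed form; objective: simpler.

-- ===== PORT A =====
-- A's loop state: (ip, even, odd); branches in the same order as the Python.
def calcStepA (st : List Int × Int × Int) (i : Int) : List Int × Int × Int :=
  if PySem.Int.mod i 2 = 0 then (st.1 ++ [st.2.1], st.2.1 + 2, st.2.2)
  else if PySem.Int.mod i 2 ≠ 0 then (st.1 ++ [st.2.2], st.2.1, st.2.2 + 1)
  else st

def calc_py (n : Int) : List Int :=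
  ((PySem.List.pyRange 0 n 1).foldl calcStepA ([], 0, 0)).1

-- ===== PORT B =====
def calc_py_alt (n : Int) : List Int :=
  (PySem.List.pyRange 0 n 1).map
    (fun i => if PySem.Int.mod i 2 = 0 then i else PySem.Int.floordiv (i - 1) 2)

-- ===== PRECONDITION & SPEC =====
def Spec_calc_py (n : Int) (out : List Int) : Prop := out = calc_py_alt n
instance (n : Int) (out : List Int) : Decidable (Spec_calc_py n out) := by unfold Spec_calc_py; infer_instance

-- ===== CLAIM (what is proved, stated in full; the proofs are below) =====
def Claim_equal_calc_py : Prop := ∀ (n : Int), Dom_calc_py n → Spec_calc_py n (calc_py n)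

-- ===== LEMMAS AND PROOFS =====

-- Invariant: after processing 0..m-1, ip is B's list and the counters are m + m % 2 and m / 2.
theorem calc_invariant (m : Nat) :
    (PySem.List.pyRange 0 m 1).foldl calcStepA ([], 0, 0) =
      ((PySem.List.pyRange 0 m 1).map
        (fun i => if PySem.Int.mod i 2 = 0 then i else PySem.Int.floordiv (i - 1) 2),
       ((m + m % 2 : Nat) : Int), ((m / 2 : Nat) : Int)) := by
  induction m with
  | zero => simp
  | succ m ih =>
    have h1 : ((m : Int) + 1) = ((m + 1 : Nat) : Int) := by push_cast; ring
    have hsplit : PySem.List.pyRange 0 ((m + 1 : Nat) : Int) 1 =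
        PySem.List.pyRange 0 (m : Int) 1 ++ [(m : Int)] := by
      rw [← h1, PySem.List.pyRange_one_succ_right (by positivity)]
    rw [hsplit, List.foldl_append, ih, List.map_append]
    rcases Nat.even_or_odd m with he | ho
    · have hm : PySem.Int.mod (m : Int) 2 = 0 := by
        rw [PySem.Int.mod_eq_zero_iff_dvd]
        exact_mod_cast he.two_dvd
      obtain ⟨k, hk⟩ := he
      subst hk
      simp only [List.foldl_cons, List.foldl_nil, calcStepA, hm, List.map_cons,
        List.map_nil]
      simp only [if_true, Prod.mk.injEq, List.append_right_inj, List.cons.injEq, and_true]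
      refine ⟨?_, ?_, ?_⟩ <;> omega
    · obtain ⟨k, hk⟩ := ho
      subst hk
      have hm : PySem.Int.mod ((2 * k + 1 : Nat) : Int) 2 ≠ 0 := by
        simp only [ne_eq, PySem.Int.mod_eq_zero_iff_dvd]
        intro h
        have h2 : (2 : ℕ) ∣ 2 * k + 1 := by exact_mod_cast h
        omega
      simp only [List.foldl_cons, List.foldl_nil, calcStepA, hm, List.map_cons,
        List.map_nil]
      simp only [ne_eq, hm, not_false_iff, if_true]
      have h2 : ((2 * k + 1 : Nat) : Int) - 1 = ((2 * k : Nat) : Int) := by push_cast; ring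
      have h3 : PySem.Int.floordiv ((2 * k : Nat) : Int) 2 = ((2 * k / 2 : Nat) : Int) := by
        exact_mod_cast PySem.Int.floordiv_natCast (2 * k) 2
      rw [h2, h3]
      simp only [if_false, Prod.mk.injEq, List.append_right_inj, List.cons.injEq, and_true]
      refine ⟨?_, ?_, ?_⟩ <;> omega

-- ===== VERDICT (by name: the statement is the Claim_ definition above) =====
theorem calc_py_spec : Claim_equal_calc_py := by
  intro n _
  unfold Spec_calc_py calc_py calc_py_alt
  rcases le_or_gt n 0 with h | h
  · rw [PySem.List.pyRange_one_eq_nil h]; simp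
  · have hn : n = ((n.toNat : Nat) : Int) := by omega
    rw [hn, calc_invariant]
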